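-- pv_equiv track=rewrite | github.com/Codream00/skku-python-study-2019 | week1/assignment2.py | find_common_char2
-- ===== SOURCE A (Python) =====
-- def find_common_char2(word1,word2):
--     setOfWord1 = []
--     common = []
--
--     for c in word1:
--         if c not in setOfWord1:
--             setOfWord1.append(c)
--
--     for c in word2:
--         if c not in common and c in setOfWord1:
--             common.append(c)
--
--     return common
-- ===== SOURCE B (Python) =====
-- def find_common_char2(word1, word2):
--     return sorted(set(word1) & set(word2), key=word2.index)
-- ===== Notes on version B (the rewrite author's own statement) =====
-- stated objective: alternative
-- what changed: Replaces A's two accumulator loops with inline 'not in' list-scan dedup by a set intersection of the two character sets followed by a sort keyed on first occurrence in word2 (sorted(set(word1) & set(word2), key=word2.index)); hash-set construction/intersection removes A's O(k) inner list scans per character, at the cost of an O(k log k) sort plus k index scans.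
import Mathlib
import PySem

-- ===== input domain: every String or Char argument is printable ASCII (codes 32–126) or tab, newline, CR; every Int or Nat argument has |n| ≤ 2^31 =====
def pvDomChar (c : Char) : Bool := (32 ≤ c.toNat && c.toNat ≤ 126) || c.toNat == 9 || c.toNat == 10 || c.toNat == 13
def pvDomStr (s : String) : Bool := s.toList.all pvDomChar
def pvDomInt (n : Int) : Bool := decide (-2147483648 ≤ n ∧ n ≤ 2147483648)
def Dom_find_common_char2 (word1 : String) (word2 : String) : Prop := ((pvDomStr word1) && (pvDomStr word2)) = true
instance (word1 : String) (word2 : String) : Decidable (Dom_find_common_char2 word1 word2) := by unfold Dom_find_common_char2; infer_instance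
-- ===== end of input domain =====

-- B replaces A's two accumulator loops by set intersection plus a sort keyed on the
-- first-occurrence index in word2: sorted(set(word1) & set(word2), key=word2.index).

-- ===== PORT A =====
-- iteration over a Python string yields one-character strings
def find_common_char2 (word1 : String) (word2 : String) : List String :=
  let setOfWord1 : List String :=
    (word1.toList.map (fun c => String.ofList [c])).foldl
      (fun acc c => if c ∉ acc then acc ++ [c] else acc) []
  let common : List String :=
    (word2.toList.map (fun c => String.ofList [c])).foldl
      (fun acc c => if c ∉ acc ∧ c ∈ setOfWord1 then acc ++ [c] else acc) []
  common

-- ===== PORT B =====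
-- word2.index(c) on a one-character member of word2 equals str.find, which PySem.Str.find
-- models exactly (every element of the intersection occurs in word2, so .index never raises);
-- the sort key is injective on the intersection (distinct chars have distinct first indices),
-- so the result does not depend on the set's iteration order.
def find_common_char2_alt (word1 : String) (word2 : String) : List String :=
  let s1 : PySem.Set String := PySem.Set.ofList (word1.toList.map (fun c => String.ofList [c]))
  let s2 : PySem.Set String := PySem.Set.ofList (word2.toList.map (fun c => String.ofList [c]))
  PySem.List.sorted (PySem.Set.inter s1 s2) (fun c => PySem.Str.find word2 c) false

-- ===== PRECONDITION & SPEC =====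
def Spec_find_common_char2 (word1 : String) (word2 : String) (out : List String) : Prop := out = find_common_char2_alt word1 word2
instance (word1 : String) (word2 : String) (out : List String) : Decidable (Spec_find_common_char2 word1 word2 out) := by unfold Spec_find_common_char2; infer_instance

-- ===== CLAIM (what is proved, stated in full; the proofs are below) =====
def Claim_equal_find_common_char2 : Prop := ∀ (word1 : String) (word2 : String), Dom_find_common_char2 word1 word2 → Spec_find_common_char2 word1 word2 (find_common_char2 word1 word2)

-- ===== LEMMAS AND PROOFS =====

-- A's inline "if c not in acc: acc.append(c)" step is exactly PySem.Set.add
theorem pv_add_eq (acc : List String) (c : String) :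
    (if c ∉ acc then acc ++ [c] else acc) = PySem.Set.add acc c := by
  simp [PySem.Set.add, PySem.Set.contains]

-- A's interleaved dedup-and-filter loop equals filtering the running dedup set
theorem pv_loop_eq (S : List String) : ∀ (l s : List String),
    l.foldl (fun acc c => if c ∉ acc ∧ c ∈ S then acc ++ [c] else acc)
      (s.filter (fun c => decide (c ∈ S)))
    = (l.foldl PySem.Set.add s).filter (fun c => decide (c ∈ S)) := by
  intro l
  induction l with
  | nil => intro s; simp
  | cons c l ih =>
    intro s
    simp only [List.foldl_cons]
    by_cases hs : c ∈ s
    · have h1 : PySem.Set.add s c = s := by simp [PySem.Set.add, PySem.Set.contains, hs]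
      by_cases hS : c ∈ S
      · have : c ∈ s.filter (fun c => decide (c ∈ S)) := by simp [hs, hS]
        rw [h1, if_neg (by simp [this]), ih]
      · rw [h1, if_neg (by simp [hS]), ih]
    · have h1 : PySem.Set.add s c = s ++ [c] := by
        simp [PySem.Set.add, PySem.Set.contains, hs]
      by_cases hS : c ∈ S
      · have hacc : c ∉ s.filter (fun c => decide (c ∈ S)) := by simp [hs]
        have h2 : s.filter (fun c => decide (c ∈ S)) ++ [c]
            = (s ++ [c]).filter (fun c => decide (c ∈ S)) := by simp [hS]
        rw [if_pos ⟨hacc, hS⟩, h1, h2, ih]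
      · have h2 : s.filter (fun c => decide (c ∈ S))
            = (s ++ [c]).filter (fun c => decide (c ∈ S)) := by simp [hS]
        rw [if_neg (by simp [hS]), h1, h2, ih]


theorem pv_find_one (w : List Char) (c : Char) (k : Nat)
    (hk : PySem.List.index? w c = some k) :
    PySem.Chars.find w [c] = (k : Int) := by
  obtain ⟨pre, suf, hxs, hlen, hnotin⟩ := (PySem.List.index?_eq_some_iff w c k).mp hk
  have hinf : [c] <:+: w := ⟨pre, suf, by rw [hxs]; simp⟩
  have h0 : 0 ≤ PySem.Chars.find w [c] := (PySem.Chars.find_nonneg_iff w [c]).mpr hinf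
  obtain ⟨hpref, hmin⟩ := PySem.Chars.find_spec h0
  set n := (PySem.Chars.find w [c]).toNat with hn
  have hkpref : [c] <+: w.drop k := by
    rw [hxs, ← hlen, List.drop_left]; exact ⟨suf, rfl⟩
  have hnk : ¬ k < n := fun h => hmin k h hkpref
  have hget : w[n]? = some c := by
    obtain ⟨t, ht⟩ := hpref
    have : (w.drop n)[0]? = some c := by rw [← ht]; rfl
    rw [List.getElem?_drop] at this; simpa using this
  have hkn : ¬ n < k := by
    intro h
    apply hnotin
    have : pre[n]? = some c := by
      rw [hxs, List.getElem?_append, if_pos (by omega : n < pre.length)] at hget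
      exact hget
    exact List.mem_of_getElem? this
  have : n = k := by omega
  omega

theorem pv_index?_map (w : List Char) (c : Char) :
    PySem.List.index? (w.map (fun c => String.ofList [c])) (String.ofList [c])
      = PySem.List.index? w c := by
  induction w with
  | nil => rfl
  | cons d w ih =>
    by_cases h : d = c
    · subst h
      rw [List.map_cons, PySem.List.index?_cons_self, PySem.List.index?_cons_self]
    · have h' : String.ofList [d] ≠ String.ofList [c] := by
        intro he
        exact h (by simpa using congrArg String.toList he)
      rw [List.map_cons, PySem.List.index?_cons_of_ne _ h',
        PySem.List.index?_cons_of_ne _ h, ih]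

theorem pv_dedup_pairwise {α : Type} [BEq α] [LawfulBEq α] (xs : List α) :
    (PySem.List.dedup xs).Pairwise
      (fun a b => (PySem.List.index? xs a).getD 0 < (PySem.List.index? xs b).getD 0) := by
  induction xs using List.reverseRecOn with
  | nil => simp [PySem.List.dedup]
  | append_singleton xs x ih =>
    have hded : PySem.List.dedup (xs ++ [x])
        = if x ∈ xs then PySem.List.dedup xs else PySem.List.dedup xs ++ [x] := by
      simp only [PySem.List.dedup_eq_ofList, PySem.Set.ofList_eq_foldl, List.foldl_append,
        List.foldl_cons, List.foldl_nil]
      rw [← PySem.Set.ofList_eq_foldl]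
      by_cases hx : x ∈ xs
      · rw [if_pos hx]
        simp [PySem.Set.add, PySem.Set.contains, (PySem.Set.mem_ofList xs x).mpr hx]
      · rw [if_neg hx]
        have : x ∉ PySem.Set.ofList xs := fun h => hx ((PySem.Set.mem_ofList xs x).mp h)
        simp [PySem.Set.add, PySem.Set.contains, this]
    have hmem : ∀ a ∈ PySem.List.dedup xs, a ∈ xs :=
      fun a ha => (PySem.List.mem_dedup xs a).mp ha
    have hsame : ∀ a ∈ PySem.List.dedup xs,
        PySem.List.index? (xs ++ [x]) a = PySem.List.index? xs a :=
      fun a ha => PySem.List.index?_append_of_mem [x] (hmem a ha)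
    by_cases hx : x ∈ xs
    · rw [hded, if_pos hx]
      exact ih.imp_of_mem (fun {a b} ha hb h => by rw [hsame a ha, hsame b hb]; exact h)
    · rw [hded, if_neg hx]
      rw [List.pairwise_append]
      refine ⟨ih.imp_of_mem (fun {a b} ha hb h => by rw [hsame a ha, hsame b hb]; exact h),
        by simp, ?_⟩
      intro a ha b hb
      simp only [List.mem_singleton] at hb
      rw [hb, hsame a ha, PySem.List.index?_append_singleton_self xs x hx]
      have hax : a ∈ xs := hmem a ha
      obtain ⟨ka, hka⟩ := Option.isSome_iff_exists.mp ((PySem.List.index?_isSome_iff xs a).mpr hax)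
      obtain ⟨pre, suf, hxs2, hlen, _⟩ := (PySem.List.index?_eq_some_iff xs a ka).mp hka
      have : ka < xs.length := by rw [hxs2]; simp; omega
      rw [hka]
      simpa using this


-- key equality: on members of l2 the sort key is the first-occurrence index
theorem pv_key_eq (word2 : String) (a : String)
    (ha : a ∈ word2.toList.map (fun c => String.ofList [c])) :
    PySem.Str.find word2 a
      = ((PySem.List.index? (word2.toList.map (fun c => String.ofList [c])) a).getD 0 : Nat) := by
  obtain ⟨c, hc, rfl⟩ := List.mem_map.mp ha
  obtain ⟨k, hk⟩ := Option.isSome_iff_exists.mp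
    ((PySem.List.index?_isSome_iff word2.toList c).mpr hc)
  rw [pv_index?_map, hk, PySem.Str.find_eq]
  simp only [String.toList_ofList]
  simpa using pv_find_one word2.toList c k hk

-- ===== VERDICT (by name: the statement is the Claim_ definition above) =====
theorem find_common_char2_spec : Claim_equal_find_common_char2 := by
  intro word1 word2 _
  unfold Spec_find_common_char2 find_common_char2 find_common_char2_alt
  simp only []
  set l1 := word1.toList.map (fun c => String.ofList [c]) with hl1
  set l2 := word2.toList.map (fun c => String.ofList [c]) with hl2
  have hA1 : l1.foldl (fun acc c => if c ∉ acc then acc ++ [c] else acc) []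
      = PySem.Set.ofList l1 := by
    rw [PySem.Set.ofList_eq_foldl]
    have hf : (fun (acc : List String) c => if c ∉ acc then acc ++ [c] else acc)
        = PySem.Set.add := funext fun a => funext fun c => pv_add_eq a c
    rw [hf]
  have hA2 := pv_loop_eq (PySem.Set.ofList l1) l2 []
  simp only [List.filter_nil] at hA2
  rw [hA1, hA2, ← PySem.Set.ofList_eq_foldl]
  refine (PySem.List.sorted_eq_of_perm_of_pairwise_lt _ _ _ ?_ ?_).symm
  · -- permutation: both sides hold exactly the chars common to both words, nodup
    simp only [PySem.Set.inter]
    rw [List.perm_ext_iff_of_nodup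
      ((PySem.Set.nodup_ofList l2).filter _)
      ((PySem.Set.nodup_ofList l1).filter _)]
    intro a
    simp only [PySem.Set.contains, List.mem_filter,
      PySem.Set.mem_ofList, decide_eq_true_eq, List.contains_iff_mem]
    tauto
  · -- strictly increasing sort key along the filtered dedup of word2
    have hp := (pv_dedup_pairwise l2).imp_of_mem (by
      intro a b ha hb h
      rw [PySem.List.dedup_eq_ofList] at ha hb
      have hka := pv_key_eq word2 a (by rw [← PySem.Set.mem_ofList]; exact ha)
      have hkb := pv_key_eq word2 b (by rw [← PySem.Set.mem_ofList]; exact hb)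
      show PySem.Str.find word2 a < PySem.Str.find word2 b
      rw [hka, hkb]
      exact_mod_cast h)
    rw [PySem.List.dedup_eq_ofList] at hp
    exact hp.filter _
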